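-- pv_equiv track=rewrite | github.com/maciejsachajdak/jezyki_skryptowe | Classes/Validator.py | check
-- ===== SOURCE A (Python) =====
-- def check(str):
--     ml=str.lower()
--     d=0
--     for char in ml:
--         if ml.count(char)>1:
--             d=d+1
--     if d>1:
--         return False
--     else:
--         return True
-- ===== SOURCE B (Python) =====
-- def check(str):
--     # Sort the lowercased characters, then scan adjacent pairs:
--     # any equal neighbours mean a repeated character.
--     chars = sorted(str.lower())
--     for i in range(1, len(chars)):
--         if chars[i - 1] == chars[i]:
--             return False
--     return True
-- ===== Notes on version B (the rewrite author's own statement) =====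
-- stated objective: faster
-- what changed: Replaced per-position repeated .count scans and a repeat counter by sort-then-adjacent-pair scan (A returns True iff all lowercased characters are distinct, since its counter is never exactly 1).
import Mathlib
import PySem

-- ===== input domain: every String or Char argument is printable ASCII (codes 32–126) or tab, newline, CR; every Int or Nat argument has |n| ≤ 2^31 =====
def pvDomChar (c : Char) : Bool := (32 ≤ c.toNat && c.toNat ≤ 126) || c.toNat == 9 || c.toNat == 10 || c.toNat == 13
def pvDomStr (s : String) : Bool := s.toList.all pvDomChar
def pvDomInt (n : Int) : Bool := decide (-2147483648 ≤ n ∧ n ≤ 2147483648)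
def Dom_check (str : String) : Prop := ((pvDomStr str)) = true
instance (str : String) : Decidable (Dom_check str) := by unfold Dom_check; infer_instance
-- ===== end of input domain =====

-- B replaces A's quadratic repeated .count scans with sort-then-adjacent-pair scan (simpler).

-- ===== PORT A =====
-- iteration over a string yields its characters; ml.count(char) for a 1-char
-- substring equals the character count, ported exactly as List.count over ml's chars
def check (str : String) : Bool :=
  let ml := (PySem.Str.lower str).toList
  let d : Int := ml.foldl (fun d char => if ml.count char > 1 then d + 1 else d) 0
  if d > 1 then false else true

-- ===== PORT B =====
-- Source B: chars = sorted(str.lower()); all(a != b for a, b in zip(chars, chars[1:]))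
def check_alt (str : String) : Bool :=
  let chars := PySem.List.sorted (PySem.Str.lower str).toList (fun x => x) false
  (chars.zip (PySem.List.slice chars (some 1) none)).all (fun p => p.1 != p.2)

-- ===== PRECONDITION & SPEC =====
def Spec_check (str : String) (out : Bool) : Prop := out = check_alt str
instance (str : String) (out : Bool) : Decidable (Spec_check str out) := by unfold Spec_check; infer_instance

-- ===== CLAIM (what is proved, stated in full; the proofs are below) =====
def Claim_equal_check : Prop := ∀ (str : String), Dom_check str → Spec_check str (check str)

-- ===== LEMMAS AND PROOFS =====

-- A side: the loop counts the positions whose character repeats; that count is ≤ 1 iff the list has no duplicates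
lemma countP_repeats_le_one_iff {l : List Char} :
    (l.countP (fun c => decide (l.count c > 1)) ≤ 1) ↔ l.Nodup := by
  constructor
  · intro h
    rw [List.nodup_iff_count_le_one]
    intro a
    by_contra hc
    rw [not_le] at hc
    have hmem : a ∈ l := List.count_pos_iff.mp (by omega)
    have : l.count a ≤ l.countP (fun c => decide (l.count c > 1)) := by
      rw [List.count]
      apply List.countP_mono_left
      intro x hx hbeq
      have : x = a := by simpa using hbeq
      subst this
      simpa using hc
    omega
  · intro h
    have : l.countP (fun c => decide (l.count c > 1)) = 0 := by
      rw [List.countP_eq_zero]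
      intro a ha
      have := (List.nodup_iff_count_le_one.mp h) a
      simpa using by omega
    omega

lemma check_eq_nodup (str : String) :
    check str = decide ((PySem.Str.lower str).toList.Nodup) := by
  simp only [check, PySem.List.foldl_ite_add_one]
  split_ifs with hd
  · have h2 : ¬ ((PySem.Str.lower str).toList.countP
        (fun c => decide ((PySem.Str.lower str).toList.count c > 1)) ≤ 1) := by omega
    exact (decide_eq_false (fun hn => h2 (countP_repeats_le_one_iff.mpr hn))).symm
  · have h2 : (PySem.Str.lower str).toList.countP
        (fun c => decide ((PySem.Str.lower str).toList.count c > 1)) ≤ 1 := by omega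
    exact (decide_eq_true (countP_repeats_le_one_iff.mp h2)).symm

-- B side: on a ≤-sorted list, "no equal adjacent pair" is exactly Nodup
lemma adj_all_ne_iff_nodup {l : List Char} (hs : l.Pairwise (· ≤ ·)) :
    ((l.zip l.tail).all (fun p => p.1 != p.2)) = true ↔ l.Nodup := by
  induction l with
  | nil => simp
  | cons a t ih =>
    cases t with
    | nil => simp
    | cons b u =>
      rw [List.pairwise_cons] at hs
      obtain ⟨hab, hbu⟩ := hs
      have ihr := ih hbu
      constructor
      · intro h
        simp only [List.tail_cons, List.zip_cons_cons, List.all_cons, Bool.and_eq_true] at h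
        obtain ⟨hne, hrest⟩ := h
        have hne' : a ≠ b := by simpa using hne
        have hnd : (b :: u).Nodup := ihr.mp (by simpa using hrest)
        refine List.nodup_cons.mpr ⟨?_, hnd⟩
        intro hmem
        rcases List.mem_cons.mp hmem with h1 | h2
        · exact hne' h1
        · have hba : b ≤ a := by
            rw [List.pairwise_cons] at hbu
            exact hbu.1 a h2
          have : a ≤ b := hab b (List.mem_cons_self ..)
          exact hne' (le_antisymm this hba)
      · intro h
        have hnd := List.nodup_cons.mp h
        have hne : a ≠ b := fun he => hnd.1 (he ▸ List.mem_cons_self ..)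
        simp only [List.tail_cons, List.zip_cons_cons, List.all_cons, Bool.and_eq_true]
        exact ⟨by simpa using hne, by simpa using ihr.mpr hnd.2⟩

lemma check_alt_eq_nodup (str : String) :
    check_alt str = decide ((PySem.Str.lower str).toList.Nodup) := by
  simp only [check_alt, PySem.List.slice_from_one]
  have hperm : (PySem.List.sorted (PySem.Str.lower str).toList (fun x => x) false).Perm
      (PySem.Str.lower str).toList := PySem.List.sorted_perm ..
  have hpw : (PySem.List.sorted (PySem.Str.lower str).toList (fun x => x) false).Pairwise
      (fun a b => (fun x => x) a ≤ (fun x => x) b) := PySem.List.sorted_pairwise ..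
  have hiff := adj_all_ne_iff_nodup
      (l := PySem.List.sorted (PySem.Str.lower str).toList (fun x => x) false) hpw
  rw [hperm.nodup_iff] at hiff
  rcases Decidable.em ((PySem.Str.lower str).toList.Nodup) with h | h
  · rw [decide_eq_true h]
    exact hiff.mpr h
  · rw [decide_eq_false h]
    exact Bool.eq_false_iff.mpr (fun ht => h (hiff.mp ht))

-- ===== VERDICT (by name: the statement is the Claim_ definition above) =====
theorem check_spec : Claim_equal_check := by
  intro str _
  unfold Spec_check
  rw [check_eq_nodup, check_alt_eq_nodup]
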